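-- pv_equiv track=rewrite | github.com/PunchyArchy/qt_pvp | qt_pvp/cms_interface/functions.py | find_photo_before_timestamp
-- ===== SOURCE A (Python) =====
-- def find_photo_before_timestamp(tracks_before_lifting, stop_speed=2,
--                                 min_stop_points=3):
--     count = 0
--     first_stop_idx = None
--     for i, track in enumerate(tracks_before_lifting):
--         spd = track.get("sp") or 0
--         if spd <= stop_speed:
--             count += 1
--             if first_stop_idx is None:
--                 first_stop_idx = i
--             if count >= min_stop_points:
--                 return tracks_before_lifting[first_stop_idx].get("gt")
--         else:
--             count = 0
--             first_stop_idx = None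
--     return None
-- ===== SOURCE B (Python) =====
-- def find_photo_before_timestamp(tracks_before_lifting, stop_speed=2,
--                                 min_stop_points=3):
--     # Two-pointer run scan: measure each maximal run of stop points in one
--     # inner sweep instead of maintaining a running counter and start index.
--     n = len(tracks_before_lifting)
--     i = 0
--     while i < n:
--         if (tracks_before_lifting[i].get("sp") or 0) <= stop_speed:
--             j = i + 1
--             while j < n and (tracks_before_lifting[j].get("sp") or 0) <= stop_speed:
--                 j += 1
--             if j - i >= min_stop_points:
--                 return tracks_before_lifting[i].get("gt")
--             i = j
--         else:
--             i += 1
--     return None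
-- ===== Notes on version B (the rewrite author's own statement) =====
-- stated objective: alternative
-- what changed: A keeps a running counter and a remembered run-start index updated at every element; B instead scans with two pointers, measuring each maximal stop-speed run in one inner sweep and returning the run's first gt once a run is long enough.
import Mathlib
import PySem

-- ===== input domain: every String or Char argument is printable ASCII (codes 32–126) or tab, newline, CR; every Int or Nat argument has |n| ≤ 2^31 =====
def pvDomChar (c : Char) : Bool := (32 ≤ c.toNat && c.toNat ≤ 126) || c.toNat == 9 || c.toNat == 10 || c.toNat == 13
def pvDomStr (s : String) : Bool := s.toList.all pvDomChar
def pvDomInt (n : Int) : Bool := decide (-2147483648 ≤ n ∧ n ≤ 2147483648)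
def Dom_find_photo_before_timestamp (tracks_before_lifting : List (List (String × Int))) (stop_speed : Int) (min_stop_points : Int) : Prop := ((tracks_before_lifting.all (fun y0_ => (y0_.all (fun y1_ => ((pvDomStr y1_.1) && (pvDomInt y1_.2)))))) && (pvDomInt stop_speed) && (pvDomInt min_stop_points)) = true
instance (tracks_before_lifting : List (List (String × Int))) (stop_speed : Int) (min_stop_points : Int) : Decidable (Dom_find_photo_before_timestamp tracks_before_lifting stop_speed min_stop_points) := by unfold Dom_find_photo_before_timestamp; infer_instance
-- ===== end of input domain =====

-- B replaces A's running counter + remembered run-start index with a two-pointer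
-- scan over maximal stop-speed runs (objective: alternative; same O(n) cost).

-- ===== PORT A =====
-- A's for-loop over enumerate(tracks) with state (count, first_stop_idx).
-- `track.get("sp") or 0`: the value is an int, falsy iff 0, so it equals .getD 0.
def fpbtA_loop (all : List (List (String × Int))) (stop_speed min_stop_points : Int) :
    List (Int × List (String × Int)) → Int → Option Int → Option Int
  | [], _, _ => none
  | (i, track) :: rest, count, first_stop_idx =>
    let spd := ((PySem.Dict.mk track).get? "sp").getD 0
    if spd ≤ stop_speed then
      let count' := count + 1
      let fsi' := match first_stop_idx with | none => some i | some j => some j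
      if min_stop_points ≤ count' then
        match PySem.List.pyGet? all (fsi'.getD 0) with
        | some t => (PySem.Dict.mk t).get? "gt"
        | none => none   -- unreachable: first_stop_idx is always a valid index
      else fpbtA_loop all stop_speed min_stop_points rest count' fsi'
    else fpbtA_loop all stop_speed min_stop_points rest 0 none

def find_photo_before_timestamp (tracks_before_lifting : List (List (String × Int))) (stop_speed : Int) (min_stop_points : Int) : Option Int :=
  fpbtA_loop tracks_before_lifting stop_speed min_stop_points
    (PySem.List.enumerate tracks_before_lifting 0) 0 none

-- ===== PORT B =====
def fpbtB_stop (stop_speed : Int) (t : List (String × Int)) : Bool :=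
  ((PySem.Dict.mk t).get? "sp").getD 0 ≤ stop_speed

-- length of the inner sweep: how far j advances over consecutive stop points
def fpbtB_runLen (stop_speed : Int) : List (List (String × Int)) → Nat
  | [] => 0
  | t :: rest => if fpbtB_stop stop_speed t then fpbtB_runLen stop_speed rest + 1 else 0

def fpbtB_scan (stop_speed min_stop_points : Int) : List (List (String × Int)) → Option Int
  | [] => none
  | t :: rest =>
    if fpbtB_stop stop_speed t then
      let L := fpbtB_runLen stop_speed rest
      if min_stop_points ≤ (1 + L : Int) then (PySem.Dict.mk t).get? "gt"
      else fpbtB_scan stop_speed min_stop_points (rest.drop L)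
    else fpbtB_scan stop_speed min_stop_points rest
  termination_by l => l.length
  decreasing_by
  · simp
  · simp

def find_photo_before_timestamp_alt (tracks_before_lifting : List (List (String × Int))) (stop_speed : Int) (min_stop_points : Int) : Option Int :=
  fpbtB_scan stop_speed min_stop_points tracks_before_lifting

-- ===== PRECONDITION & SPEC =====
def Spec_find_photo_before_timestamp (tracks_before_lifting : List (List (String × Int))) (stop_speed : Int) (min_stop_points : Int) (out : Option Int) : Prop := out = find_photo_before_timestamp_alt tracks_before_lifting stop_speed min_stop_points
instance (tracks_before_lifting : List (List (String × Int))) (stop_speed : Int) (min_stop_points : Int) (out : Option Int) : Decidable (Spec_find_photo_before_timestamp tracks_before_lifting stop_speed min_stop_points out) := by unfold Spec_find_photo_before_timestamp; infer_instance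

-- ===== CLAIM (what is proved, stated in full; the proofs are below) =====
def Claim_equal_find_photo_before_timestamp : Prop := ∀ (tracks_before_lifting : List (List (String × Int))) (stop_speed : Int) (min_stop_points : Int), Dom_find_photo_before_timestamp tracks_before_lifting stop_speed min_stop_points → Spec_find_photo_before_timestamp tracks_before_lifting stop_speed min_stop_points (find_photo_before_timestamp tracks_before_lifting stop_speed min_stop_points)

-- ===== LEMMAS AND PROOFS =====

-- Combined invariant, by strong induction on the remaining suffix l:
-- (fresh) with count = 0 and no remembered index, A's loop on the suffix is B's scan;
-- (mid)   mid-run with count c (1 <= c < ms), the remembered run-start index is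
--         pre.length - c and holds track t0; A's loop returns t0's "gt" iff the
--         total run length reaches ms, else it continues like B's scan after the run.
theorem fpbt_combo (ss ms : Int) : ∀ n (l : List (List (String × Int))), l.length ≤ n →
    (∀ pre, fpbtA_loop (pre ++ l) ss ms (PySem.List.enumerate l pre.length) 0 none
        = fpbtB_scan ss ms l) ∧
    (∀ pre (c : Int) t0, 1 ≤ c → c < ms →
        PySem.List.pyGet? (pre ++ l) ((pre.length : Int) - c) = some t0 →
        fpbtA_loop (pre ++ l) ss ms (PySem.List.enumerate l pre.length) c (some ((pre.length : Int) - c))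
          = if ms ≤ c + (fpbtB_runLen ss l : Int) then (PySem.Dict.mk t0).get? "gt"
            else fpbtB_scan ss ms (l.drop (fpbtB_runLen ss l))) := by
  intro n
  induction n with
  | zero =>
    intro l hl
    have hnil : l = [] := List.eq_nil_of_length_eq_zero (Nat.le_zero.mp hl)
    subst hnil
    refine ⟨fun pre => by simp [PySem.List.enumerate, fpbtA_loop, fpbtB_scan],
            fun pre c t0 h1 h2 _ => ?_⟩
    simp only [PySem.List.enumerate, fpbtA_loop, fpbtB_runLen]
    rw [if_neg (by push_cast; omega)]
    simp [fpbtB_scan]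
  | succ n ih =>
    intro l hl
    match l with
    | [] =>
      refine ⟨fun pre => by simp [PySem.List.enumerate, fpbtA_loop, fpbtB_scan],
              fun pre c t0 h1 h2 _ => ?_⟩
      simp only [PySem.List.enumerate, fpbtA_loop, fpbtB_runLen]
      rw [if_neg (by push_cast; omega)]
      simp [fpbtB_scan]
    | t :: rest =>
      have hrest : rest.length ≤ n := by
        simp only [List.length_cons] at hl; omega
      constructor
      · -- fresh state
        intro pre
        rw [PySem.List.enumerate_cons, fpbtB_scan]
        by_cases hs : (((PySem.Dict.mk t).get? "sp").getD 0 ≤ ss)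
        · have hsB : fpbtB_stop ss t = true := by
            simp [fpbtB_stop, hs]
          have hrun : fpbtB_runLen ss (t :: rest) = fpbtB_runLen ss rest + 1 := by
            simp [fpbtB_runLen, hsB]
          simp only [fpbtA_loop, if_pos hs, if_pos hsB]
          have hget : PySem.List.pyGet? (pre ++ t :: rest) ((pre.length : Nat) : Int) = some t :=
            PySem.List.pyGet?_append_length ..
          by_cases hms : ms ≤ (0 : Int) + 1
          · rw [if_pos hms, if_pos (by omega)]
            simp only [Option.getD_some, hget]
          · rw [if_neg hms]
            have hmid := (ih rest hrest).2 (pre ++ [t]) 1 t le_rfl (by omega)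
              (by simp)
            simp only [List.append_assoc, List.cons_append, List.nil_append,
              List.length_append, List.length_cons, List.length_nil,
              Nat.cast_add, Nat.cast_one, zero_add, add_sub_cancel_right] at hmid
            rw [show (0 : Int) + 1 = 1 by norm_num, hmid]
        · have hsB : fpbtB_stop ss t = false := by
            simp [fpbtB_stop, hs]
          simp only [fpbtA_loop, if_neg hs, if_neg (by simp [hsB] : ¬ fpbtB_stop ss t = true)]
          have hfresh := (ih rest hrest).1 (pre ++ [t])
          simp only [List.append_assoc, List.cons_append, List.nil_append,
            List.length_append, List.length_cons, List.length_nil,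
            Nat.cast_add, Nat.cast_one, zero_add] at hfresh
          exact hfresh
      · -- mid-run state
        intro pre c t0 h1 h2 hget
        rw [PySem.List.enumerate_cons]
        by_cases hs : (((PySem.Dict.mk t).get? "sp").getD 0 ≤ ss)
        · have hsB : fpbtB_stop ss t = true := by
            simp [fpbtB_stop, hs]
          have hrun : fpbtB_runLen ss (t :: rest) = fpbtB_runLen ss rest + 1 := by
            simp [fpbtB_runLen, hsB]
          rw [hrun, List.drop_succ_cons]
          simp only [fpbtA_loop, if_pos hs]
          by_cases hms : ms ≤ c + 1
          · rw [if_pos hms, if_pos (by push_cast; omega)]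
            simp only [Option.getD_some, hget]
          · rw [if_neg hms]
            have hmid := (ih rest hrest).2 (pre ++ [t]) (c + 1) t0 (by omega) (by omega)
              (by
                simp only [List.append_assoc, List.cons_append, List.nil_append,
                  List.length_append, List.length_cons, List.length_nil,
                  Nat.cast_add, Nat.cast_one, zero_add]
                rw [show (pre.length : Int) + 1 - (c + 1) = (pre.length : Int) - c by ring]
                exact hget)
            simp only [List.append_assoc, List.cons_append, List.nil_append,
              List.length_append, List.length_cons, List.length_nil,
              Nat.cast_add, Nat.cast_one, zero_add] at hmid
            rw [show (pre.length : Int) + 1 - (c + 1) = (pre.length : Int) - c by ring] at hmid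
            rw [hmid]
            push_cast
            rw [show c + 1 + (fpbtB_runLen ss rest : Int) = c + ((fpbtB_runLen ss rest : Int) + 1) by ring]
        · have hsB : fpbtB_stop ss t = false := by
            simp [fpbtB_stop, hs]
          have hrun : fpbtB_runLen ss (t :: rest) = 0 := by
            simp [fpbtB_runLen, hsB]
          rw [hrun]
          simp only [Nat.cast_zero, add_zero, List.drop_zero]
          rw [if_neg (by omega)]
          rw [fpbtB_scan]
          rw [if_neg (by simp [hsB] : ¬ fpbtB_stop ss t = true)]
          simp only [fpbtA_loop, if_neg hs]
          have hfresh := (ih rest hrest).1 (pre ++ [t])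
          simp only [List.append_assoc, List.cons_append, List.nil_append,
            List.length_append, List.length_cons, List.length_nil,
            Nat.cast_add, Nat.cast_one, zero_add] at hfresh
          exact hfresh

-- ===== VERDICT (by name: the statement is the Claim_ definition above) =====
theorem find_photo_before_timestamp_spec : Claim_equal_find_photo_before_timestamp := by
  intro tracks ss ms _
  unfold Spec_find_photo_before_timestamp find_photo_before_timestamp find_photo_before_timestamp_alt
  have h := (fpbt_combo ss ms tracks.length tracks le_rfl).1 []
  simpa using h
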